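-- pv_equiv track=rewrite | github.com/esc/numba-rvsdg-talk | assets/transformed/break_and_continue.py | transformed_break_and_continue
-- ===== SOURCE A (Python) =====
-- def transformed_break_and_continue(x: int, y: int) -> int:
--     __scfg_iterator_1__ = iter(range(2))
--     i = None
--     __scfg_loop_cont__ = True
--     while __scfg_loop_cont__:
--         __scfg_iter_last_1__ = i
--         i = next(__scfg_iterator_1__, '__scfg_sentinel__')
--         if i != '__scfg_sentinel__':
--             if i == x:
--                 __scfg_exit_var_0__ = 1
--                 __scfg_backedge_var_0__ = 1
--             elif i == y:
--                 __scfg_exit_var_0__ = 2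
--                 __scfg_backedge_var_0__ = 1
--             else:
--                 __scfg_backedge_var_0__ = 0
--                 __scfg_exit_var_0__ = -1
--         else:
--             __scfg_exit_var_0__ = 0
--             __scfg_backedge_var_0__ = 1
--         __scfg_loop_cont__ = not __scfg_backedge_var_0__
--     if __scfg_exit_var_0__ in (0,):
--         i = __scfg_iter_last_1__
--         __scfg_control_var_0__ = 0
--     elif __scfg_exit_var_0__ in (1,):
--         i = 3
--         __scfg_return_value__ = i + 100
--         __scfg_control_var_0__ = 1
--     else:
--         i = 4
--         __scfg_control_var_0__ = 2
--     if __scfg_control_var_0__ in (0, 2):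
--         __scfg_return_value__ = i
--     else:
--         pass
--     return __scfg_return_value__
-- ===== SOURCE B (Python) =====
-- def transformed_break_and_continue(x: int, y: int) -> int:
--     # Direct conditional chain: first match among i=0,1 with x checked before y.
--     if x == 0:
--         return 103
--     if y == 0:
--         return 4
--     if x == 1:
--         return 103
--     if y == 1:
--         return 4
--     return 1
-- ===== Notes on version B (the rewrite author's own statement) =====
-- stated objective: simpler
-- what changed: Replaces the generated iterator/state-machine loop (sentinel, backedge/exit/control variables) with a direct five-branch conditional chain preserving the x-before-y, 0-before-1 priority.
import Mathlib
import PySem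

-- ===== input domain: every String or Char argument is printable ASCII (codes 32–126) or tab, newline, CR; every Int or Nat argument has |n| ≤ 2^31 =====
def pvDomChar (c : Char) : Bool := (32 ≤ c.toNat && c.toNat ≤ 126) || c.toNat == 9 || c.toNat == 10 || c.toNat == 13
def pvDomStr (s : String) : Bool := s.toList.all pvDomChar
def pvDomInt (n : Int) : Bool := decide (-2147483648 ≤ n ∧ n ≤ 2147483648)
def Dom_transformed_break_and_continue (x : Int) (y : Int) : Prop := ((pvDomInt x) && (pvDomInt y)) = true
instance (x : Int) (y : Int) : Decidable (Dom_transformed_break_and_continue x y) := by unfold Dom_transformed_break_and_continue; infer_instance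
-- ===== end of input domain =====

-- B replaces the generated iterator/state-machine loop with a direct conditional chain (objective: simpler).

-- ===== PORT A =====
-- Loop body of A: consumes the remaining range iterator; `iterLast` is the Python
-- `i` value from before the current `next` call (None initially → Option Int).
-- Returns (__scfg_iter_last_1__, __scfg_exit_var_0__) at loop exit.
def pvLoopA (xs : List Int) (iterLast : Option Int) (x y : Int) : Option Int × Int :=
  match xs with
  | [] => (iterLast, 0)                 -- sentinel branch: exit 0, break
  | j :: rest =>
    if j = x then (some j, 1)           -- exit 1, break
    else if j = y then (some j, 2)      -- exit 2, break
    else pvLoopA rest (some j) x y      -- backedge: continue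

def transformed_break_and_continue (x : Int) (y : Int) : Int :=
  let r := pvLoopA (PySem.List.pyRange 0 2 1) none x y
  if r.2 = 0 then
    -- control 0: i = __scfg_iter_last_1__; range(2) is nonempty so it is `some`
    -- (getD 0 is unreachable)
    r.1.getD 0
  else if r.2 = 1 then
    -- control 1: i = 3; return i + 100
    3 + 100
  else
    -- control 2: i = 4; return i
    4

-- ===== PORT B =====
def transformed_break_and_continue_alt (x : Int) (y : Int) : Int :=
  if x = 0 then 103
  else if y = 0 then 4
  else if x = 1 then 103
  else if y = 1 then 4
  else 1

-- ===== PRECONDITION & SPEC =====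
def Spec_transformed_break_and_continue (x : Int) (y : Int) (out : Int) : Prop := out = transformed_break_and_continue_alt x y
instance (x : Int) (y : Int) (out : Int) : Decidable (Spec_transformed_break_and_continue x y out) := by unfold Spec_transformed_break_and_continue; infer_instance

-- ===== CLAIM (what is proved, stated in full; the proofs are below) =====
def Claim_equal_transformed_break_and_continue : Prop := ∀ (x : Int) (y : Int), Dom_transformed_break_and_continue x y → Spec_transformed_break_and_continue x y (transformed_break_and_continue x y)

-- ===== LEMMAS AND PROOFS =====
theorem pvRange2 : PySem.List.pyRange 0 2 1 = [0, 1] := by decide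

-- ===== VERDICT (by name: the statement is the Claim_ definition above) =====
theorem transformed_break_and_continue_spec : Claim_equal_transformed_break_and_continue := by
  intro x y _
  unfold Spec_transformed_break_and_continue transformed_break_and_continue
    transformed_break_and_continue_alt
  rw [pvRange2]
  simp only [pvLoopA]
  split_ifs <;> simp <;> omega
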